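-- pv_equiv track=rewrite | github.com/furuhama/gcf_emu | SEKIGAE_new.py | replace_desk_number
-- ===== SOURCE A (Python) =====
-- def replace_desk_number(name_desk_list, name, place):
--     # セットされた名前のリスト、リモートの人の名前と仕事場所の string を受け取って、置き換える
--
--     # 名前だけのリストを作成
--     set_namelist = []
--     for i in range(len(name_desk_list)):
--         set_namelist.append(name_desk_list[i][0])
--
--     # name の人が namelist の何番目にあるか
--     NAME_NUM = set_namelist.index(name)
--     STORE_NUMBER = name_desk_list[NAME_NUM][1]
--
--     # 置き換えする
--     name_desk_list[NAME_NUM][1] = place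
--
--     # 最後に空いた席を available として追加
--     name_desk_list.append(['available', STORE_NUMBER])
--
--     return name_desk_list
-- ===== SOURCE B (Python) =====
-- def replace_desk_number(name_desk_list, name, place):
--     # recursive functional rebuild: peel rows until the first match, rebuild the row
--     # with the desk replaced and put the freed desk as ['available', ...] right after
--     # the remaining tail; the list is reconstructed on return (no index arithmetic).
--     # ValueError when the name is absent (like list.index in A).
--     if not name_desk_list:
--         raise ValueError(f"{name!r} is not in list")
--     head, *tail = name_desk_list
--     if head[0] == name:
--         return [head[:1] + [place] + head[2:], *tail, ['available', head[1]]]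
--     return [head] + replace_desk_number(tail, name, place)
-- ===== Notes on version B (the rewrite author's own statement) =====
-- stated objective: alternative
-- what changed: Replaces A's two staged passes with in-place indexed mutation (build a name list, list.index, assign by index, append) by a structural recursion that rebuilds the list functionally: peel rows until the first match, reconstruct that row by slicing, and thread the freed 'available' row through the recursive return; the input list is not mutated.
import Mathlib
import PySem

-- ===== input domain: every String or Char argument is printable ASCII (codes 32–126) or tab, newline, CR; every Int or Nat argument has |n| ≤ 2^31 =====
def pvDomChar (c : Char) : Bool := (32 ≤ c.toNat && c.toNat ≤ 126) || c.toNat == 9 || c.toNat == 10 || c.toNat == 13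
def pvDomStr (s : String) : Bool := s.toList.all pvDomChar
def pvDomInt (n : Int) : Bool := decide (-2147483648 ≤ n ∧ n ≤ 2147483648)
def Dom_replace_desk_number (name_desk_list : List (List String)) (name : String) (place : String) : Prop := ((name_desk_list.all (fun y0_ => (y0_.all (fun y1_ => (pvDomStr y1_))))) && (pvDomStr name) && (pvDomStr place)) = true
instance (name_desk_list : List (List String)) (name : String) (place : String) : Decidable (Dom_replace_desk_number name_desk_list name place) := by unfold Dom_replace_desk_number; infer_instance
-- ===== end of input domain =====

-- B replaces A's two staged passes with in-place indexed mutation by a structural recursion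
-- that rebuilds the list functionally (slicing the matched row, threading the freed desk);
-- return-value equivalence only: Python A mutates its argument list, Python B does not.


-- ===== PORT A =====
-- Literal port: build set_namelist over range(len), .index the name, read the stored desk,
-- overwrite slot 1, append ['available', stored].  Pre_ guarantees every index is in range,
-- so the getD defaults are never the result; index? = none is Python's ValueError (outside Pre_).
def replace_desk_number (name_desk_list : List (List String)) (name : String) (place : String) : List (List String) :=
  let set_namelist : List String :=
    (List.range name_desk_list.length).foldl
      (fun acc i => acc ++ [(name_desk_list.getD i []).headD ""]) []
  match PySem.List.index? set_namelist name with
  | none => []  -- ValueError: name not in list (outside Pre_)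
  | some nameNum =>
    let storeNumber := (name_desk_list.getD nameNum []).getD 1 ""
    let replaced := name_desk_list.set nameNum ((name_desk_list.getD nameNum []).set 1 place)
    replaced ++ [["available", storeNumber]]

-- ===== PORT B =====
-- Structural recursion: peel rows until the first match; there, rebuild the row by slicing
-- (head[:1] ++ [place] ++ head[2:]) and emit tail followed by the freed 'available' row.
-- [] on empty input is Python's ValueError (outside Pre_).
def replace_desk_number_alt (name_desk_list : List (List String)) (name : String) (place : String) : List (List String) :=
  match name_desk_list with
  | [] => []  -- ValueError: name not in list (outside Pre_)
  | head :: tail =>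
    if head.headD "" = name then
      (head.take 1 ++ [place] ++ head.drop 2) :: (tail ++ [["available", head.getD 1 ""]])
    else
      head :: replace_desk_number_alt tail name place

-- ===== PRECONDITION & SPEC =====
-- Pre_: exactly where Python A returns — every row nonempty (the name-list build reads row[0]
-- of every row) and the first row whose head is `name` exists and has at least 2 entries.
def Pre_replace_desk_number (name_desk_list : List (List String)) (name : String) (place : String) : Prop :=
  (name_desk_list.all (fun l => !l.isEmpty)
    && ((name_desk_list.find? (fun l => l.headD "" == name)).map
          (fun r => decide (2 ≤ r.length))).getD false) = true
instance (name_desk_list : List (List String)) (name : String) (place : String) : Decidable (Pre_replace_desk_number name_desk_list name place) := by unfold Pre_replace_desk_number; infer_instance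

def pvWitness_replace_desk_number : List (List String) × String × String :=
  ([["alice", "1"], ["bob", "2"]], "bob", "desk9")

def Spec_replace_desk_number (name_desk_list : List (List String)) (name : String) (place : String) (out : List (List String)) : Prop := out = replace_desk_number_alt name_desk_list name place
instance (name_desk_list : List (List String)) (name : String) (place : String) (out : List (List String)) : Decidable (Spec_replace_desk_number name_desk_list name place out) := by unfold Spec_replace_desk_number; infer_instance

-- ===== CLAIM =====
def Claim_equal_replace_desk_number : Prop := ∀ (name_desk_list : List (List String)) (name : String) (place : String), Dom_replace_desk_number name_desk_list name place → Pre_replace_desk_number name_desk_list name place → Spec_replace_desk_number name_desk_list name place (replace_desk_number name_desk_list name place)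

-- ===== LEMMAS AND PROOFS =====

-- A's name-list loop builds exactly the list of row heads.
lemma setnl_eq (ndl : List (List String)) :
    (List.range ndl.length).foldl (fun acc i => acc ++ [(ndl.getD i []).headD ""]) [] =
      ndl.map (fun l => l.headD "") := by
  rw [PySem.List.foldl_append_singleton_eq_map]
  rw [List.nil_append]
  apply List.ext_getElem
  · simp
  · intro i h1 h2
    simp [List.getD_eq_getElem?_getD, List.getElem?_eq_getElem (by simpa using h1)]

-- slicing a row of length ≥ 2 at slot 1 is the indexed overwrite
lemma slice_eq_set (r : List String) (place : String) (h : 2 ≤ r.length) :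
    r.take 1 ++ [place] ++ r.drop 2 = r.set 1 place := by
  match r, h with
  | a :: b :: t, _ => simp

-- Main induction: under Pre_, B's recursion equals A's index?-and-set computation.
lemma alt_eq_A (name place : String) : ∀ (ndl : List (List String)),
    Pre_replace_desk_number ndl name place →
    replace_desk_number_alt ndl name place =
      match PySem.List.index? (ndl.map (fun l => l.headD "")) name with
      | none => []
      | some n => ndl.set n ((ndl.getD n []).set 1 place) ++ [["available", (ndl.getD n []).getD 1 ""]] := by
  intro ndl
  induction ndl with
  | nil => intro h; simp [Pre_replace_desk_number] at h
  | cons r rest ih =>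
    intro hpre
    unfold Pre_replace_desk_number at hpre
    simp only [List.all_cons, List.find?_cons, Bool.and_eq_true] at hpre
    rw [List.map_cons]
    by_cases h : r.headD "" = name
    · rw [h, PySem.List.index?_cons_self]
      have hb : (r.headD "" == name) = true := by simpa using h
      have hr : 2 ≤ r.length := by
        simp only [hb] at hpre
        simpa using hpre.2
      simp only [replace_desk_number_alt, if_pos h, slice_eq_set r place hr]
      simp
    · rw [PySem.List.index?_cons_of_ne _ h]
      have hb : (r.headD "" == name) = false := by simpa using h
      simp only [hb] at hpre
      have hpre' : Pre_replace_desk_number rest name place := by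
        unfold Pre_replace_desk_number
        simp only [Bool.and_eq_true]
        exact ⟨hpre.1.2, hpre.2⟩
      simp only [replace_desk_number_alt, if_neg h, ih hpre']
      have hmem : name ∈ rest.map (fun l => l.headD "") := by
        have := hpre.2
        rcases hf : List.find? (fun l => l.headD "" == name) rest with _ | r'
        · rw [hf] at this; simp at this
        · have := List.find?_some hf
          have hm := List.mem_of_find?_eq_some hf
          exact List.mem_map.mpr ⟨r', hm, by simpa using this⟩
      cases hx : PySem.List.index? (rest.map (fun l => l.headD "")) name with
      | none =>
        rw [PySem.List.index?_eq_none_iff] at hx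
        exact absurd hmem hx
      | some n => simp

-- ===== VERDICT =====
theorem replace_desk_number_spec : Claim_equal_replace_desk_number := by
  intro ndl name place _ hpre
  unfold Spec_replace_desk_number
  rw [alt_eq_A name place ndl hpre]
  unfold replace_desk_number
  simp only [setnl_eq]
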